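-- pv_equiv track=rewrite | github.com/rohan-dot/Rasa-NLU | bioasq_agentic_local.py | con_fac
-- ===== SOURCE A (Python) =====
-- from collections import Counter
--
-- def con_fac(c):
--     flat = [x[0].lower().strip() for x in c if x]
--     if not flat:
--         return ["unknown"]
--     best = Counter(flat).most_common(1)[0][0]
--     for x in c:
--         if x and x[0].lower().strip() == best:
--             return x[:5]
--     return [best]
-- ===== SOURCE B (Python) =====
-- def con_fac(c):
--     keys = [x[0].lower().strip() for x in c if x]
--     best = None
--     bestn = 0
--     for x in c:
--         if x:
--             n = keys.count(x[0].lower().strip())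
--             if n > bestn:
--                 best = x
--                 bestn = n
--     if best is None:
--         return ["unknown"]
--     return best[:5]
-- ===== Notes on version B (the rewrite author's own statement) =====
-- stated objective: alternative
-- what changed: Replaces Counter + most_common(1) + a separate rescan of c with a single brute-force scan that, for each truthy item, counts its normalized key directly in the flat key list with list.count and keeps the first item whose count strictly exceeds the running maximum; no Counter/dict at all, trading O(n^2) counting for structural simplicity.
import Mathlib
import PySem

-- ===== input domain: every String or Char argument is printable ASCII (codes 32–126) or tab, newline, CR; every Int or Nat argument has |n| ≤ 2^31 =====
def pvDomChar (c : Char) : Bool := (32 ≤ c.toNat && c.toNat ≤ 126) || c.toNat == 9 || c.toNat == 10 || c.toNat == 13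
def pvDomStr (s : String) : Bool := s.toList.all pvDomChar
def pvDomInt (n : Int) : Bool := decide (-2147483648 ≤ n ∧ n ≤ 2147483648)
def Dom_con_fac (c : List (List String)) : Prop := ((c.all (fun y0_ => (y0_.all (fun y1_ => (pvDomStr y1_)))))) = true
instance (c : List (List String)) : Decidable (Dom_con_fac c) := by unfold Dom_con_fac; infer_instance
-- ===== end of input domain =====

-- B replaces A's Counter + most_common(1) + rescan by a brute-force scan that counts each
-- element's normalized key directly with list.count, keeping the first strict running maximum;
-- no Counter/dict at all (objective: alternative — O(n^2) counting traded for structural simplicity).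


-- x[0].lower().strip(), shared normalization helper of both ports
def pvNorm (s : String) : String := PySem.Str.strip (PySem.Str.lower s)

-- ===== PORT A =====
def con_fac (c : List (List String)) : List String :=
  let flat := c.filterMap (fun x => match x with | [] => none | h :: _ => some (pvNorm h))
  if flat = [] then ["unknown"]
  else
    -- Counter(flat).most_common(1)[0]: the FIRST item of maximal count in insertion order,
    -- ported as PySem.List.max? (first extremal element) over the counter's items.
    match PySem.List.max? (PySem.Dict.counter flat).items (fun p => p.2) with
    | none => ["unknown"]   -- unreachable: flat ≠ []
    | some m =>
      match c.find? (fun x => !x.isEmpty && (pvNorm (x.headD "") == m.1)) with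
      | some x => PySem.List.slice x none (some 5)
      | none => [m.1]

-- ===== PORT B =====
def con_fac_alt (c : List (List String)) : List String :=
  let keys := c.filterMap (fun x => match x with | [] => none | h :: _ => some (pvNorm h))
  let s := c.foldl (fun (b : Option (List String) × Int) x =>
    match x with
    | [] => b
    | h :: _ =>
      let n : Int := (PySem.List.count keys (pvNorm h) : Int)
      if b.2 < n then (some x, n) else b) ((none, 0) : Option (List String) × Int)
  match s.1 with
  | none => ["unknown"]
  | some x => PySem.List.slice x none (some 5)

-- ===== PRECONDITION & SPEC =====
def Spec_con_fac (c : List (List String)) (out : List String) : Prop := out = con_fac_alt c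
instance (c : List (List String)) (out : List String) : Decidable (Spec_con_fac c out) := by unfold Spec_con_fac; infer_instance

-- ===== CLAIM (what is proved, stated in full; the proofs are below) =====
def Claim_equal_con_fac : Prop := ∀ (c : List (List String)), Dom_con_fac c → Spec_con_fac c (con_fac c)

-- ===== LEMMAS AND PROOFS =====

-- the per-element extraction of A's comprehension, and its flat list
def pvF (x : List String) : Option String := match x with | [] => none | h :: _ => some (pvNorm h)
def pvFlat (c : List (List String)) : List String := c.filterMap pvF

-- A's rescan predicate
def pvPred (k : String) (x : List String) : Bool := !x.isEmpty && (pvNorm (x.headD "") == k)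

-- B's loop predicate: truthy and key count equal to m (stated via an abstract f : String → Int)
def pvPredM (f : String → Int) (m : Int) (x : List String) : Bool :=
  !x.isEmpty && (f (pvNorm (x.headD "")) == m)

-- B's loop body (abstract f) and the running maximum of f over the keys of l
def pvStep (f : String → Int) (b : Option (List String) × Int) (x : List String) :
    Option (List String) × Int :=
  match x with
  | [] => b
  | h :: _ => if b.2 < f (pvNorm h) then (some x, f (pvNorm h)) else b

def pvMaxF (f : String → Int) (l : List (List String)) : Int :=
  (pvFlat l).foldl (fun a k => max a (f k)) 0

lemma pvPred_iff_pvF (k : String) (x : List String) : pvPred k x = true ↔ pvF x = some k := by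
  cases x with
  | nil => simp [pvPred, pvF]
  | cons h t => simp [pvPred, pvF, List.isEmpty]

lemma pvPredM_iff (f : String → Int) (m : Int) (x : List String) :
    pvPredM f m x = true ↔ ∃ k, pvF x = some k ∧ f k = m := by
  cases x with
  | nil => simp [pvPredM, pvF]
  | cons h t => simp [pvPredM, pvF, List.isEmpty]

-- bound: every key of l has f-value ≤ pvMaxF f l
lemma pvLe_maxF (f : String → Int) (l : List (List String)) (k : String) (hk : k ∈ pvFlat l) :
    f k ≤ pvMaxF f l :=
  (PySem.List.le_foldl_max_int (pvFlat l) f 0).2 k hk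

-- the maximum is attained when all key values are positive and the key list is nonempty
lemma pvMaxF_attained (f : String → Int) (l : List (List String))
    (hpos : ∀ k ∈ pvFlat l, 0 < f k) (hne : pvFlat l ≠ []) :
    ∃ k ∈ pvFlat l, f k = pvMaxF f l := by
  have h : pvMaxF f l = 0 ∨ pvMaxF f l ∈ (pvFlat l).map f := by
    unfold pvMaxF
    have := PySem.List.foldl_max_mem ((pvFlat l).map f) (0 : Int)
    rwa [List.foldl_map] at this
  rcases h with h0 | hmem
  · obtain ⟨k0, hk0⟩ := List.exists_mem_of_ne_nil _ hne
    have := hpos k0 hk0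
    have hle := pvLe_maxF f l k0 hk0
    omega
  · obtain ⟨k, hk, hfk⟩ := List.mem_map.1 hmem
    exact ⟨k, hk, hfk⟩

-- characterization of B's fold: it returns (first truthy element whose key attains the max, max)
lemma pvFold_char (f : String → Int) (l : List (List String))
    (hpos : ∀ x ∈ l, ∀ h t, x = h :: t → 0 < f (pvNorm h)) :
    l.foldl (pvStep f) ((none, 0) : Option (List String) × Int) =
      (l.find? (pvPredM f (pvMaxF f l)), pvMaxF f l) := by
  induction l using List.reverseRecOn with
  | nil => rfl
  | append_singleton l x ih =>
    have hpos' : ∀ y ∈ l, ∀ h t, y = h :: t → 0 < f (pvNorm h) := by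
      intro y hy h t hyt; exact hpos y (List.mem_append_left _ hy) h t hyt
    have hposflat : ∀ k ∈ pvFlat l, 0 < f k := by
      intro k hk
      obtain ⟨y, hy, hFy⟩ := List.mem_filterMap.1 hk
      cases y with
      | nil => simp [pvF] at hFy
      | cons h t =>
        have : pvNorm h = k := by simpa [pvF] using hFy
        exact this ▸ hpos' (h :: t) hy h t rfl
    rw [List.foldl_append, ih hpos']
    cases x with
    | nil =>
      have hflat : pvFlat (l ++ [[]]) = pvFlat l := by
        unfold pvFlat; rw [List.filterMap_append]; simp [pvF]
      have hmax : pvMaxF f (l ++ [[]]) = pvMaxF f l := by unfold pvMaxF; rw [hflat]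
      rw [hmax, List.find?_append]
      show pvStep f _ [] = _
      unfold pvStep
      cases l.find? (pvPredM f (pvMaxF f l)) <;> simp [pvPredM]
    | cons h t =>
      have hflat : pvFlat (l ++ [h :: t]) = pvFlat l ++ [pvNorm h] := by
        unfold pvFlat; rw [List.filterMap_append]; simp [pvF]
      have hmax : pvMaxF f (l ++ [h :: t]) = max (pvMaxF f l) (f (pvNorm h)) := by
        unfold pvMaxF; rw [hflat, List.foldl_append]; rfl
      show pvStep f _ (h :: t) = _
      unfold pvStep
      dsimp only
      by_cases hlt : pvMaxF f l < f (pvNorm h)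
      · rw [if_pos hlt, hmax, max_eq_right (le_of_lt hlt)]
        have hnone : l.find? (pvPredM f (f (pvNorm h))) = none := by
          rw [List.find?_eq_none]
          intro y hy hp
          obtain ⟨k, hFy, hfk⟩ := (pvPredM_iff f _ y).1 hp
          have hk : k ∈ pvFlat l := List.mem_filterMap.2 ⟨y, hy, hFy⟩
          have := pvLe_maxF f l k hk
          omega
        rw [List.find?_append, hnone]
        simp [pvPredM, List.isEmpty]
      · rw [if_neg hlt, hmax, max_eq_left (by omega)]
        by_cases hne : pvFlat l = []
        · exfalso
          have h0 : pvMaxF f l = 0 := by unfold pvMaxF; rw [hne]; rfl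
          have : 0 < f (pvNorm h) :=
            hpos (h :: t) (List.mem_append_right _ (List.mem_singleton.2 rfl)) h t rfl
          omega
        · obtain ⟨k, hk, hfk⟩ := pvMaxF_attained f l hposflat hne
          obtain ⟨y, hy, hFy⟩ := List.mem_filterMap.1 hk
          have hsome : (l.find? (pvPredM f (pvMaxF f l))).isSome := by
            rw [List.find?_isSome]
            exact ⟨y, hy, (pvPredM_iff f _ y).2 ⟨k, hFy, hfk⟩⟩
          obtain ⟨w, hw⟩ := Option.isSome_iff_exists.1 hsome
          rw [List.find?_append, hw]
          simp

-- first-max selection over the distinct keys (A's most_common(1))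
def pvBestKey (cnt : String → Int) (k0 : String) (K : List String) : String :=
  K.foldl (fun b j => if cnt b < cnt j then j else b) k0

lemma pvBestKey_mem (cnt : String → Int) (k0 : String) (K : List String) :
    pvBestKey cnt k0 K ∈ k0 :: K := by
  induction K generalizing k0 with
  | nil => simp [pvBestKey]
  | cons j K ih =>
    unfold pvBestKey
    rw [List.foldl_cons]
    by_cases h : cnt k0 < cnt j
    · simp only [h, if_pos]
      have := ih j
      simp only [List.mem_cons] at this ⊢
      tauto
    · simp only [h, if_false]
      have := ih k0
      simp only [List.mem_cons] at this ⊢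
      tauto

lemma pvBestKey_cons (cnt : String → Int) (k0 j : String) (K : List String) :
    pvBestKey cnt k0 (j :: K) =
      if cnt k0 < cnt j then pvBestKey cnt j K else pvBestKey cnt k0 K := by
  unfold pvBestKey
  rw [List.foldl_cons]
  by_cases h : cnt k0 < cnt j <;> simp [h]

lemma pvBestKey_max (cnt : String → Int) (k0 : String) (K : List String) :
    ∀ j ∈ k0 :: K, cnt j ≤ cnt (pvBestKey cnt k0 K) := by
  induction K generalizing k0 with
  | nil => simp [pvBestKey]
  | cons j K ih =>
    intro y hy
    rw [pvBestKey_cons]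
    simp only [List.mem_cons] at hy
    by_cases h : cnt k0 < cnt j
    · rw [if_pos h]
      rcases hy with h1 | h1 | h1
      · rw [h1]; exact le_of_lt (lt_of_lt_of_le h (ih j j (by simp)))
      · rw [h1]; exact ih j j (by simp)
      · exact ih j y (by simp [h1])
    · rw [if_neg h]
      rcases hy with h1 | h1 | h1
      · rw [h1]; exact ih k0 k0 (by simp)
      · rw [h1]; exact le_trans (by omega) (ih k0 k0 (by simp))
      · exact ih k0 y (by simp [h1])

-- the best key is the FIRST of k0 :: K attaining its cnt value
lemma pvBestKey_find (cnt : String → Int) (k0 : String) (K : List String) :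
    (k0 :: K).find? (fun j => cnt j == cnt (pvBestKey cnt k0 K)) = some (pvBestKey cnt k0 K) := by
  induction K generalizing k0 with
  | nil => simp [pvBestKey]
  | cons j K ih =>
    rw [pvBestKey_cons]
    by_cases h : cnt k0 < cnt j
    · rw [if_pos h]
      have hmax := pvBestKey_max cnt j K j (by simp)
      have hk0 : (cnt k0 == cnt (pvBestKey cnt j K)) = false := by
        simp only [beq_eq_false_iff_ne, ne_eq]
        intro he; rw [← he] at hmax; omega
      rw [List.find?_cons_of_neg (by simp [hk0])]
      exact ih j
    · rw [if_neg h]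
      by_cases hk0 : cnt k0 = cnt (pvBestKey cnt k0 K)
      · have hfind := ih k0
        rw [List.find?_cons_of_pos (by simp [hk0])] at hfind ⊢
        exact hfind
      · have hfind := ih k0
        rw [List.find?_cons_of_neg (by simp [hk0])] at hfind ⊢
        have hj : (cnt j == cnt (pvBestKey cnt k0 K)) = false := by
          simp only [beq_eq_false_iff_ne, ne_eq]
          intro he
          have := pvBestKey_max cnt k0 K k0 (by simp)
          omega
        rw [List.find?_cons_of_neg (by simp [hj])]
        exact hfind

-- A's max? over the counter items, computed as pvBestKey
lemma pvFoldl_some {α : Type} (key : α → Int) (ys : List α) (m : α) :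
    ys.foldl (fun acc x => match acc with
      | none => some x
      | some w => if key w < key x then some x else some w) (some m) =
    some (ys.foldl (fun w x => if key w < key x then x else w) m) := by
  induction ys generalizing m with
  | nil => rfl
  | cons y ys ih =>
    simp only [List.foldl_cons]
    by_cases h : key m < key y <;> simp [h, ih]

lemma pvMax?_cons {α : Type} (key : α → Int) (y : α) (ys : List α) :
    PySem.List.max? (y :: ys) key = some (ys.foldl (fun w x => if key w < key x then x else w) y) := by
  unfold PySem.List.max?
  rw [List.foldl_cons]
  exact pvFoldl_some key ys y

lemma pvFold2 (cnt : String → Int) (g2 : String → String × Int)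
    (hg2 : ∀ k, g2 k = (k, cnt k)) (k0 : String) (K : List String) :
    (K.map g2).foldl (fun w x => if w.2 < x.2 then x else w) (g2 k0) = g2 (pvBestKey cnt k0 K) := by
  induction K generalizing k0 with
  | nil => simp [pvBestKey]
  | cons j K ih =>
    simp only [List.map_cons, List.foldl_cons]
    unfold pvBestKey
    rw [List.foldl_cons]
    by_cases h : cnt k0 < cnt j
    · simp only [hg2, h, if_pos]
      simpa only [hg2] using ih j
    · simp only [hg2, h, if_false]
      simpa only [hg2] using ih k0

-- Set.add-folds only append: the start list is a prefix of the result
lemma pvFoldl_add_prefix (v : List String) (s : PySem.Set String) :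
    ∃ t, v.foldl PySem.Set.add s = s ++ t := by
  induction v generalizing s with
  | nil => exact ⟨[], by simp⟩
  | cons a v ih =>
    rw [List.foldl_cons]
    by_cases h : PySem.Set.contains s a = true
    · rw [show PySem.Set.add s a = s from by unfold PySem.Set.add; rw [if_pos h]]
      exact ih s
    · rw [show PySem.Set.add s a = s ++ [a] from by unfold PySem.Set.add; rw [if_neg h]]
      obtain ⟨t, ht⟩ := ih (s ++ [a])
      exact ⟨a :: t, by rw [ht]; simp⟩

-- the count function both ports use (B literally, A through the counter's items)
def pvCnt (c : List (List String)) (k : String) : Int :=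
  (PySem.List.count (pvFlat c) k : Int)

lemma pvPosFlat (c : List (List String)) : ∀ k ∈ pvFlat c, 0 < pvCnt c k := by
  intro k hk
  unfold pvCnt
  rw [PySem.List.count_eq]
  exact_mod_cast List.count_pos_iff.2 hk

lemma pvPos (c : List (List String)) :
    ∀ x ∈ c, ∀ h t, x = h :: t → 0 < pvCnt c (pvNorm h) := by
  intro x hx h t hxt
  apply pvPosFlat
  exact List.mem_filterMap.2 ⟨x, hx, by rw [hxt]; rfl⟩

-- the central fact: A's rescan for the best key finds the same element as B's loop
lemma pvMain (c : List (List String)) (s0 : String) (srest : List String)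
    (hS : PySem.Set.ofList (pvFlat c) = s0 :: srest) (hnil : pvFlat c ≠ []) :
    c.find? (pvPred (pvBestKey (pvCnt c) s0 srest)) =
      c.find? (pvPredM (pvCnt c) (pvMaxF (pvCnt c) c)) := by
  have hbkS : pvBestKey (pvCnt c) s0 srest ∈ PySem.Set.ofList (pvFlat c) := by
    rw [hS]; exact pvBestKey_mem (pvCnt c) s0 srest
  have hbkflat : pvBestKey (pvCnt c) s0 srest ∈ pvFlat c :=
    (PySem.Set.mem_ofList _ _).1 hbkS
  obtain ⟨ka, hka, hfka⟩ := pvMaxF_attained (pvCnt c) c (pvPosFlat c) hnil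
  have hm : pvCnt c (pvBestKey (pvCnt c) s0 srest) = pvMaxF (pvCnt c) c := by
    have h1 : pvCnt c (pvBestKey (pvCnt c) s0 srest) ≤ pvMaxF (pvCnt c) c :=
      pvLe_maxF (pvCnt c) c _ hbkflat
    have hkaS : ka ∈ s0 :: srest := by rw [← hS]; exact (PySem.Set.mem_ofList _ _).2 hka
    have h2 := pvBestKey_max (pvCnt c) s0 srest ka hkaS
    omega
  have hsome : (c.find? (pvPredM (pvCnt c) (pvMaxF (pvCnt c) c))).isSome := by
    obtain ⟨y, hy, hFy⟩ := List.mem_filterMap.1 hka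
    rw [List.find?_isSome]
    exact ⟨y, hy, (pvPredM_iff _ _ y).2 ⟨ka, hFy, hfka⟩⟩
  obtain ⟨w, hw⟩ := Option.isSome_iff_exists.1 hsome
  have hw' := hw
  rw [List.find?_eq_some_iff_append] at hw'
  obtain ⟨hpw, l1, l2, hc, hl1⟩ := hw'
  obtain ⟨kw, hFw, hfkw⟩ := (pvPredM_iff _ _ w).1 hpw
  have hflat : pvFlat c = pvFlat l1 ++ kw :: pvFlat l2 := by
    rw [hc]
    unfold pvFlat
    rw [List.filterMap_append, List.filterMap_cons, hFw]
  have hl1flat : ∀ k ∈ pvFlat l1, pvCnt c k ≠ pvMaxF (pvCnt c) c := by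
    intro k hk hkm
    obtain ⟨y, hy, hFy⟩ := List.mem_filterMap.1 hk
    have hneg := hl1 y hy
    have hpos : pvPredM (pvCnt c) (pvMaxF (pvCnt c) c) y = true :=
      (pvPredM_iff _ _ y).2 ⟨k, hFy, hkm⟩
    rw [hpos] at hneg
    simp at hneg
  have hkwnot : kw ∉ pvFlat l1 := fun h => hl1flat kw h hfkw
  have hcontains : PySem.Set.contains (PySem.Set.ofList (pvFlat l1)) kw = false := by
    simp [PySem.Set.contains, PySem.Set.mem_ofList, hkwnot]
  obtain ⟨t, hSs⟩ : ∃ t, PySem.Set.ofList (pvFlat c) =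
      PySem.Set.ofList (pvFlat l1) ++ kw :: t := by
    rw [hflat, PySem.Set.ofList_eq_foldl, List.foldl_append, List.foldl_cons,
      ← PySem.Set.ofList_eq_foldl]
    rw [show PySem.Set.add (PySem.Set.ofList (pvFlat l1)) kw =
        PySem.Set.ofList (pvFlat l1) ++ [kw] from by
      unfold PySem.Set.add; rw [hcontains]; simp]
    obtain ⟨t, ht⟩ := pvFoldl_add_prefix (pvFlat l2) (PySem.Set.ofList (pvFlat l1) ++ [kw])
    exact ⟨t, by rw [ht]; simp⟩
  have hfind1 : (PySem.Set.ofList (pvFlat c)).find?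
      (fun j => pvCnt c j == pvMaxF (pvCnt c) c) = some kw := by
    rw [hSs, List.find?_append]
    have hnone : (PySem.Set.ofList (pvFlat l1)).find?
        (fun j => pvCnt c j == pvMaxF (pvCnt c) c) = none := by
      rw [List.find?_eq_none]
      intro j hj
      have := hl1flat j ((PySem.Set.mem_ofList _ _).1 hj)
      simp [this]
    rw [hnone]
    simp [hfkw]
  have hfind2 : (PySem.Set.ofList (pvFlat c)).find?
      (fun j => pvCnt c j == pvMaxF (pvCnt c) c) = some (pvBestKey (pvCnt c) s0 srest) := by
    have h := pvBestKey_find (pvCnt c) s0 srest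
    rw [hm] at h
    rw [hS]
    exact h
  have hkwbk : kw = pvBestKey (pvCnt c) s0 srest := by
    rw [hfind1] at hfind2
    exact Option.some.inj hfind2
  rw [hw, List.find?_eq_some_iff_append]
  refine ⟨(pvPred_iff_pvF _ w).2 (by rw [hFw, hkwbk]), l1, l2, hc, ?_⟩
  intro y hy
  by_contra hcon
  have hpy : pvPred (pvBestKey (pvCnt c) s0 srest) y = true := by
    cases hpv : pvPred (pvBestKey (pvCnt c) s0 srest) y
    · rw [hpv] at hcon; simp at hcon
    · rfl
  have hFy : pvF y = some (pvBestKey (pvCnt c) s0 srest) := (pvPred_iff_pvF _ y).1 hpy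
  have := hl1 y hy
  rw [(pvPredM_iff _ _ y).2 ⟨pvBestKey (pvCnt c) s0 srest, hFy, hm⟩] at this
  simp at this

-- A's max? over the mapped counter items, as pvBestKey
lemma pvBest_counter (c : List (List String)) (s0 : String) (srest : List String) :
    PySem.List.max?
      ((s0 :: srest).map (fun k => (k, ((List.count k (pvFlat c) : Nat) : Int))))
      (fun p => p.2) =
      some (pvBestKey (pvCnt c) s0 srest,
        ((List.count (pvBestKey (pvCnt c) s0 srest) (pvFlat c) : Nat) : Int)) := by
  have hg2 : ∀ k, (fun k => (k, ((List.count k (pvFlat c) : Nat) : Int))) k = (k, pvCnt c k) := by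
    intro k
    simp [pvCnt, PySem.List.count_eq]
  rw [List.map_cons, pvMax?_cons]
  rw [pvFold2 (pvCnt c) (fun k => (k, ((List.count k (pvFlat c) : Nat) : Int))) hg2 s0 srest]

-- ===== VERDICT (by name: the statement is the Claim_ definition above) =====
theorem con_fac_spec : Claim_equal_con_fac := by
  intro c _
  unfold Spec_con_fac
  have hB : con_fac_alt c =
      (match c.find? (pvPredM (pvCnt c) (pvMaxF (pvCnt c) c)) with
       | none => ["unknown"]
       | some x => PySem.List.slice x none (some 5)) := by
    have h0 : con_fac_alt c =
        (match (c.foldl (pvStep (pvCnt c)) ((none, 0) : Option (List String) × Int)).1 with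
         | none => ["unknown"]
         | some x => PySem.List.slice x none (some 5)) := rfl
    rw [h0, pvFold_char (pvCnt c) c (pvPos c)]
  rw [hB]
  have h0 : con_fac c =
      (if pvFlat c = [] then ["unknown"]
       else
         match PySem.List.max? (PySem.Dict.counter (pvFlat c)).items (fun p => p.2) with
         | none => ["unknown"]
         | some m =>
           match c.find? (fun x => !x.isEmpty && (pvNorm (x.headD "") == m.1)) with
           | some x => PySem.List.slice x none (some 5)
           | none => [m.1]) := rfl
  by_cases hnil : pvFlat c = []
  · have hBnone : c.find? (pvPredM (pvCnt c) (pvMaxF (pvCnt c) c)) = none := by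
      rw [List.find?_eq_none]
      intro y hy hp
      obtain ⟨k, hFy, _⟩ := (pvPredM_iff _ _ y).1 hp
      have hkmem : k ∈ pvFlat c := List.mem_filterMap.2 ⟨y, hy, hFy⟩
      rw [hnil] at hkmem
      simp at hkmem
    rw [h0, if_pos hnil, hBnone]
  · obtain ⟨s0, srest, hS⟩ : ∃ s0 srest, PySem.Set.ofList (pvFlat c) = s0 :: srest := by
      cases hx : PySem.Set.ofList (pvFlat c) with
      | nil =>
        exfalso
        obtain ⟨k0, hk0⟩ := List.exists_mem_of_ne_nil _ hnil
        have hmem : k0 ∈ PySem.Set.ofList (pvFlat c) := (PySem.Set.mem_ofList _ _).2 hk0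
        rw [hx] at hmem
        simp at hmem
      | cons a b => exact ⟨a, b, rfl⟩
    rw [h0, if_neg hnil, PySem.Dict.items_counter, hS, pvBest_counter c s0 srest]
    have hpred : (fun x => !x.isEmpty &&
        (pvNorm (x.headD "") == (pvBestKey (pvCnt c) s0 srest,
          ((List.count (pvBestKey (pvCnt c) s0 srest) (pvFlat c) : Nat) : Int)).1)) =
        pvPred (pvBestKey (pvCnt c) s0 srest) := rfl
    show (match c.find? (fun x => !x.isEmpty &&
        (pvNorm (x.headD "") == pvBestKey (pvCnt c) s0 srest)) with
      | some x => PySem.List.slice x none (some 5)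
      | none => [pvBestKey (pvCnt c) s0 srest]) = _
    rw [show (fun x => !x.isEmpty && (pvNorm (x.headD "") == pvBestKey (pvCnt c) s0 srest)) =
        pvPred (pvBestKey (pvCnt c) s0 srest) from rfl]
    rw [pvMain c s0 srest hS hnil]
    cases hfx : c.find? (pvPredM (pvCnt c) (pvMaxF (pvCnt c) c)) with
    | none =>
      exfalso
      obtain ⟨ka, hka, hfka⟩ := pvMaxF_attained (pvCnt c) c (pvPosFlat c) hnil
      obtain ⟨y, hy, hFy⟩ := List.mem_filterMap.1 hka
      rw [List.find?_eq_none] at hfx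
      exact hfx y hy ((pvPredM_iff _ _ y).2 ⟨ka, hFy, hfka⟩)
    | some w => rfl
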